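-- pv_equiv track=rewrite | github.com/tranthanhtrung/research | big-o/MidTerm/WordTransformation.py | prepare_map
-- ===== SOURCE A (Python) =====
-- def check_str(str1, str2):
--   if len(str1) != len(str2):
--     return False
--   for i in str1:
--     if str2.find(i) != -1:
--       str1 = str1.replace(i,'',1)
--       str2 = str2.replace(i,'',1)
--   return len(str1) == 1 and len(str2) == 1
--
-- def prepare_map(arr):
--   map_b = [[] for i in arr]
--   for i in range(len(arr)):
--     for j in range(i, len(arr), 1):
--       if check_str(arr[i],arr[j]):
--         map_b[i].append(j)
--         map_b[j].append(i)
--   return map_b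
-- ===== SOURCE B (Python) =====
-- def prepare_map(arr):
--   # sort each word once, then compare sorted character lists with a linear merge scan
--   sig = [sorted(w) for w in arr]
--   def near(a, b):
--     if len(a) != len(b):
--       return False
--     i = j = da = 0
--     while i < len(a) and j < len(b):
--       if a[i] == b[j]:
--         i += 1; j += 1
--       elif a[i] < b[j]:
--         da += 1; i += 1
--       else:
--         j += 1
--     da += len(a) - i
--     return da == 1
--   n = len(arr)
--   return [[j for j in range(n) if near(sig[i], sig[j])] for i in range(n)]
-- ===== Notes on version B (the rewrite author's own statement) =====
-- stated objective: alternative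
-- what changed: B pre-sorts each word once and tests the one-letter-swap relation by a linear merge scan over the two sorted character lists (instead of A's quadratic repeated find/replace removal), and builds each adjacency row directly as a filtered range using the relation's symmetry instead of A's half-matrix double-append mutation.
import Mathlib
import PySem

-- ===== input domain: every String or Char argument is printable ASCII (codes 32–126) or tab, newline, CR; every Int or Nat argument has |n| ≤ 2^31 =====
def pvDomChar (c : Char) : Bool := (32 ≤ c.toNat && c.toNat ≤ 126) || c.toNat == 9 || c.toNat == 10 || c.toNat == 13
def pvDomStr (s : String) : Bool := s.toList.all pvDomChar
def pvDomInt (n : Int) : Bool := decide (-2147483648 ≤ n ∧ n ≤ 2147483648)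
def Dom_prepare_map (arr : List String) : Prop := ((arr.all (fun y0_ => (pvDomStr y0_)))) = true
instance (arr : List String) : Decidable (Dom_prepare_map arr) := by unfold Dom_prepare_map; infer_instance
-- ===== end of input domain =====

-- B replaces A's quadratic find/replace removal test by one sort per word plus a linear merge
-- scan, and builds each adjacency row directly by symmetry instead of half-matrix double appends.

-- ===== PORT A =====
-- the loop 'for i in str1' iterates over the ORIGINAL str1 (cs) while the state (s1, s2) shrinks;
-- str2.find(i) != -1 is PySem.Chars.find s2 [c] ≠ -1; str1.replace(i, '', 1) for the single
-- character i removes its first occurrence, which is exactly List.erase.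
def checkLoop : List Char → List Char → List Char → List Char × List Char
  | [], s1, s2 => (s1, s2)
  | c :: cs, s1, s2 =>
    if PySem.Chars.find s2 [c] ≠ -1 then checkLoop cs (s1.erase c) (s2.erase c)
    else checkLoop cs s1 s2

def check_str (str1 str2 : String) : Bool :=
  if str1.toList.length ≠ str2.toList.length then false
  else
    let r := checkLoop str1.toList str1.toList str2.toList
    r.1.length == 1 && r.2.length == 1

def prepare_map (arr : List String) : List (List Int) :=
  let init : List (List Int) := arr.map (fun _ => [])
  (PySem.List.pyRange 0 (arr.length : Int) 1).foldl (fun mb i =>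
    (PySem.List.pyRange i (arr.length : Int) 1).foldl (fun mb j =>
      if check_str (PySem.List.pyGetD arr i "") (PySem.List.pyGetD arr j "") then
        let mb1 := PySem.List.pySetD mb i (PySem.List.pyGetD mb i [] ++ [j])
        PySem.List.pySetD mb1 j (PySem.List.pyGetD mb1 j [] ++ [i])
      else mb) mb) init

-- ===== PORT B =====
-- the while-loop over indices i, j into the two sorted lists, transcribed as structural
-- recursion on the two suffixes; 'da += len(a) - i' is the second equation.
def daCount : List Char → List Char → Nat
  | [], _ => 0
  | a :: as, [] => (a :: as).length
  | a :: as, b :: bs =>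
    if a = b then daCount as bs
    else if a < b then 1 + daCount as (b :: bs)
    else daCount (a :: as) bs
termination_by a b => a.length + b.length

def near (a b : List Char) : Bool :=
  if a.length ≠ b.length then false else daCount a b == 1

def prepare_map_alt (arr : List String) : List (List Int) :=
  let sig := arr.map (fun w => PySem.List.sorted w.toList (fun c => c) false)
  (PySem.List.pyRange 0 (arr.length : Int) 1).map (fun i =>
    (PySem.List.pyRange 0 (arr.length : Int) 1).filter (fun j =>
      near (PySem.List.pyGetD sig i []) (PySem.List.pyGetD sig j [])))

-- ===== PRECONDITION & SPEC =====
def Spec_prepare_map (arr : List String) (out : List (List Int)) : Prop := out = prepare_map_alt arr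
instance (arr : List String) (out : List (List Int)) : Decidable (Spec_prepare_map arr out) := by unfold Spec_prepare_map; infer_instance

-- ===== CLAIM (what is proved, stated in full; the proofs are below) =====
def Claim_equal_prepare_map : Prop := ∀ (arr : List String), Dom_prepare_map arr → Spec_prepare_map arr (prepare_map arr)

-- ===== LEMMAS AND PROOFS =====

theorem infix_singleton_iff (c : Char) (l : List Char) : [c] <:+: l ↔ c ∈ l := by
  constructor
  · intro h; exact h.subset (by simp)
  · intro h
    obtain ⟨s, t, rfl⟩ := List.append_of_mem h
    exact ⟨s, t, by simp⟩

theorem checkLoop_ms (cs : List Char) : ∀ s1 s2 : List Char,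
    ((checkLoop cs s1 s2).1 : Multiset Char) = (s1 : Multiset Char) - ((cs : Multiset Char) ∩ s2) ∧
    ((checkLoop cs s1 s2).2 : Multiset Char) = (s2 : Multiset Char) - ((cs : Multiset Char) ∩ s2) := by
  induction cs with
  | nil => intro s1 s2; simp [checkLoop]
  | cons c cs ih =>
    intro s1 s2
    by_cases hc : c ∈ s2
    · have hfind : PySem.Chars.find s2 [c] ≠ -1 := by
        rw [Ne, PySem.Chars.find_eq_neg_one_iff, infix_singleton_iff]; simpa
      have hcnt : 1 ≤ Multiset.count c (s2 : Multiset Char) := by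
        rw [Multiset.coe_count]; exact List.count_pos_iff.mpr hc
      have hint : ((c :: cs : List Char) : Multiset Char) ∩ (s2 : Multiset Char)
          = c ::ₘ ((cs : Multiset Char) ∩ ((s2.erase c : List Char) : Multiset Char)) := by
        rw [← Multiset.coe_erase]
        ext d
        by_cases hd : d = c
        · subst hd
          simp only [← Multiset.cons_coe, Multiset.count_inter, Multiset.count_cons_self,
            Multiset.count_erase_self]
          omega
        · simp only [← Multiset.cons_coe, Multiset.count_inter,
            Multiset.count_cons_of_ne hd, Multiset.count_erase_of_ne hd]
      obtain ⟨ih1, ih2⟩ := ih (s1.erase c) (s2.erase c)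
      rw [checkLoop, if_pos hfind]
      refine ⟨?_, ?_⟩
      · rw [ih1, hint, Multiset.sub_cons, ← Multiset.coe_erase]
      · rw [ih2, hint, Multiset.sub_cons, ← Multiset.coe_erase]
    · have hfind : ¬ PySem.Chars.find s2 [c] ≠ -1 := by
        rw [Ne, PySem.Chars.find_eq_neg_one_iff, infix_singleton_iff]; simpa
      have hcnt : Multiset.count c (s2 : Multiset Char) = 0 := by
        rw [Multiset.coe_count]; exact List.count_eq_zero.mpr hc
      have hint : ((c :: cs : List Char) : Multiset Char) ∩ (s2 : Multiset Char)
          = ((cs : Multiset Char) ∩ (s2 : Multiset Char)) := by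
        ext d
        by_cases hd : d = c
        · subst hd
          simp only [← Multiset.cons_coe, Multiset.count_inter, Multiset.count_cons_self, hcnt]
          omega
        · simp only [← Multiset.cons_coe, Multiset.count_inter, Multiset.count_cons_of_ne hd]
      obtain ⟨ih1, ih2⟩ := ih s1 s2
      rw [checkLoop, if_neg hfind]
      exact ⟨by rw [ih1, hint], by rw [ih2, hint]⟩

theorem check_str_iff (s t : String) :
    check_str s t = true ↔ s.toList.length = t.toList.length ∧
      Multiset.card ((s.toList : Multiset Char) - (t.toList : Multiset Char)) = 1 ∧
      Multiset.card ((t.toList : Multiset Char) - (s.toList : Multiset Char)) = 1 := by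
  unfold check_str
  by_cases hlen : s.toList.length ≠ t.toList.length
  · simp only [if_pos hlen]
    simp only [Bool.false_eq_true, false_iff, not_and]
    intro h; exact absurd h hlen
  · simp only [if_neg hlen]
    obtain ⟨h1, h2⟩ := checkLoop_ms s.toList s.toList t.toList
    have e1 : (checkLoop s.toList s.toList t.toList).1.length
        = Multiset.card ((s.toList : Multiset Char) - (t.toList : Multiset Char)) := by
      rw [← Multiset.coe_card, h1, Multiset.sub_inter]
    have e2 : (checkLoop s.toList s.toList t.toList).2.length
        = Multiset.card ((t.toList : Multiset Char) - (s.toList : Multiset Char)) := by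
      rw [← Multiset.coe_card, h2, Multiset.inter_comm, Multiset.sub_inter]
    rw [not_not] at hlen
    simp [e1, e2, hlen]

theorem daCount_sorted : ∀ a b : List Char, a.Pairwise (· ≤ ·) → b.Pairwise (· ≤ ·) →
    daCount a b = Multiset.card ((a : Multiset Char) - (b : Multiset Char)) := by
  have cons_sub : ∀ (a : Char) (X Y : Multiset Char), a ∉ Y →
      (a ::ₘ X) - Y = a ::ₘ (X - Y) := by
    intro a X Y h
    have h0 : Multiset.count a Y = 0 := Multiset.count_eq_zero.mpr h
    ext d
    by_cases hd : d = a
    · subst hd; simp [Multiset.count_sub, Multiset.count_cons_self, h0]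
    · simp [Multiset.count_sub, Multiset.count_cons_of_ne hd]
  have sub_cons' : ∀ (b : Char) (X Y : Multiset Char), b ∉ X →
      X - (b ::ₘ Y) = X - Y := by
    intro b X Y h
    rw [Multiset.sub_cons, Multiset.erase_of_notMem h]
  intro a b
  induction a, b using daCount.induct with
  | case1 b => intro _ _; simp [daCount]
  | case2 a as => intro _ _; simp [daCount]
  | case3 a as bs ih =>
    intro ha hb
    rw [daCount, if_pos rfl, ih (List.pairwise_cons.mp ha).2 (List.pairwise_cons.mp hb).2,
      ← Multiset.cons_coe, ← Multiset.cons_coe, Multiset.sub_cons, Multiset.erase_cons_head]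
  | case4 a as b bs hne hlt ih =>
    intro ha hb
    have hnotmem : a ∉ b :: bs := by
      intro hmem
      rcases List.mem_cons.mp hmem with h | h
      · exact hne h
      · exact absurd ((List.pairwise_cons.mp hb).1 a h) (not_le.mpr hlt)
    rw [daCount, if_neg hne, if_pos hlt, ih (List.pairwise_cons.mp ha).2 hb,
      ← Multiset.cons_coe (l := as), cons_sub a (as : Multiset Char) _ (by simpa using hnotmem),
      Multiset.card_cons]
    omega
  | case5 a as b bs hne hnlt ih =>
    intro ha hb
    have hba : b < a := lt_of_le_of_ne (not_lt.mp hnlt) (fun h => hne h.symm)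
    have hnotmem : b ∉ a :: as := by
      intro hmem
      rcases List.mem_cons.mp hmem with h | h
      · exact hne h.symm
      · exact absurd ((List.pairwise_cons.mp ha).1 b h) (not_le.mpr hba)
    rw [daCount, if_neg hne, if_neg hnlt, ih ha (List.pairwise_cons.mp hb).2,
      ← Multiset.cons_coe (l := bs), sub_cons' b _ (bs : Multiset Char) (by simpa using hnotmem)]

theorem card_sub_symm {A B : Multiset Char} (h : Multiset.card A = Multiset.card B) :
    Multiset.card (A - B) = Multiset.card (B - A) := by
  have c1 : Multiset.card (A - B) + Multiset.card (A ∩ B) = Multiset.card A := by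
    rw [← Multiset.card_add, Multiset.sub_add_inter A B]
  have c2 : Multiset.card (B - A) + Multiset.card (A ∩ B) = Multiset.card B := by
    rw [Multiset.inter_comm, ← Multiset.card_add, Multiset.sub_add_inter B A]
  omega

theorem near_sorted_eq (s t : String) :
    near (PySem.List.sorted s.toList (fun c => c) false) (PySem.List.sorted t.toList (fun c => c) false)
      = check_str s t := by
  have pa := PySem.List.sorted_perm s.toList (fun c => c) false
  have pb := PySem.List.sorted_perm t.toList (fun c => c) false
  have ma : ((PySem.List.sorted s.toList (fun c => c) false : List Char) : Multiset Char)
      = (s.toList : Multiset Char) := Multiset.coe_eq_coe.mpr pa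
  have mb : ((PySem.List.sorted t.toList (fun c => c) false : List Char) : Multiset Char)
      = (t.toList : Multiset Char) := Multiset.coe_eq_coe.mpr pb
  have hpa : (PySem.List.sorted s.toList (fun c => c) false).Pairwise (· ≤ ·) :=
    PySem.List.sorted_pairwise s.toList (fun c => c)
  have hpb : (PySem.List.sorted t.toList (fun c => c) false).Pairwise (· ≤ ·) :=
    PySem.List.sorted_pairwise t.toList (fun c => c)
  rw [near, daCount_sorted _ _ hpa hpb, ma, mb, pa.length_eq, pb.length_eq]
  by_cases h : s.toList.length = t.toList.length
  · rw [if_neg (by simpa using h)]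
    cases hc : check_str s t with
    | true =>
      obtain ⟨-, h1, -⟩ := (check_str_iff s t).mp hc
      simpa using h1
    | false =>
      rw [beq_eq_false_iff_ne]
      intro h1
      have h2 : Multiset.card ((t.toList : Multiset Char) - (s.toList : Multiset Char)) = 1 := by
        have := card_sub_symm (A := (s.toList : Multiset Char)) (B := (t.toList : Multiset Char))
          (by simpa using h)
        omega
      exact absurd ((check_str_iff s t).mpr ⟨h, h1, h2⟩) (by simp [hc])
  · rw [if_pos (by simpa using h)]
    cases hc : check_str s t with
    | true => exact absurd ((check_str_iff s t).mp hc).1 h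
    | false => rfl

theorem check_str_symm (s t : String) : check_str s t = check_str t s := by
  rw [Bool.eq_iff_iff, check_str_iff, check_str_iff]
  constructor
  · rintro ⟨h1, h2, h3⟩; exact ⟨h1.symm, h3, h2⟩
  · rintro ⟨h1, h2, h3⟩; exact ⟨h1.symm, h3, h2⟩

theorem check_str_irrefl (s : String) : check_str s s = false := by
  cases hc : check_str s s with
  | true =>
    obtain ⟨-, h1, -⟩ := (check_str_iff s s).mp hc
    simp at h1
  | false => rfl

-- top-level machinery: A's double loop as a fold over the lexicographic pair list
def Pnat (arr : List String) (i j : Nat) : Bool := check_str (arr.getD i "") (arr.getD j "")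

def stepP (arr : List String) (mb : List (List Int)) (p : Nat × Nat) : List (List Int) :=
  if Pnat arr p.1 p.2 then
    let mb1 := mb.set p.1 (mb.getD p.1 [] ++ [(p.2 : Int)])
    mb1.set p.2 (mb1.getD p.2 [] ++ [(p.1 : Int)])
  else mb

def contrib (arr : List String) (k : Nat) (p : Nat × Nat) : List Int :=
  if Pnat arr p.1 p.2 then
    (if p.1 = k then [(p.2 : Int)] else []) ++ (if p.2 = k then [(p.1 : Int)] else [])
  else []

def pairsList (n : Nat) : List (Nat × Nat) :=
  (List.range n).flatMap (fun i => (List.range (n - i)).map (fun d => (i, i + d)))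

theorem stepP_length (arr : List String) (mb : List (List Int)) (p : Nat × Nat) :
    (stepP arr mb p).length = mb.length := by
  unfold stepP
  split <;> simp

theorem length_foldl_stepP (arr : List String) (ps : List (Nat × Nat)) (mb : List (List Int)) :
    (ps.foldl (stepP arr) mb).length = mb.length := by
  induction ps generalizing mb with
  | nil => rfl
  | cons p ps ih => rw [List.foldl_cons, ih, stepP_length]

theorem stepP_getD (arr : List String) (mb : List (List Int)) (p : Nat × Nat) (k : Nat)
    (h1 : p.1 < mb.length) (h2 : p.2 < mb.length) :
    (stepP arr mb p).getD k [] = mb.getD k [] ++ contrib arr k p := by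
  unfold stepP contrib
  by_cases hP : Pnat arr p.1 p.2
  · simp only [hP, if_pos]
    by_cases hk2 : p.2 = k
    · subst hk2
      by_cases hk1 : p.1 = p.2
      · rw [hk1]
        simp [List.getD_eq_getElem?_getD, h2]
      · simp [List.getD_eq_getElem?_getD, h1, h2, hk1]
    · by_cases hk1 : p.1 = k
      · subst hk1
        simp [List.getD_eq_getElem?_getD, h1, hk2]
      · simp [List.getD_eq_getElem?_getD, List.getElem?_set_ne hk1, List.getElem?_set_ne hk2,
          hk1, hk2]
  · simp only [hP, if_neg, Bool.false_eq_true, not_false_iff]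
    simp

theorem foldl_stepP_getD (arr : List String) (ps : List (Nat × Nat)) (mb : List (List Int)) (k : Nat)
    (hp : ∀ p ∈ ps, p.1 < mb.length ∧ p.2 < mb.length) :
    (ps.foldl (stepP arr) mb).getD k [] = mb.getD k [] ++ ps.flatMap (contrib arr k) := by
  induction ps generalizing mb with
  | nil => simp
  | cons p ps ih =>
    rw [List.foldl_cons, ih _ (fun q hq => by
      rw [stepP_length]; exact hp q (List.mem_cons_of_mem p hq)),
      stepP_getD arr mb p k (hp p List.mem_cons_self).1 (hp p List.mem_cons_self).2]
    simp [List.flatMap_cons]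

theorem flatMap_single {α : Type} (l : List Nat) (f : Nat → List α) (k : Nat)
    (hnd : l.Nodup) (hk : k ∈ l) (hz : ∀ j ∈ l, j ≠ k → f j = []) : l.flatMap f = f k := by
  induction l with
  | nil => cases hk
  | cons x xs ih =>
    rw [List.flatMap_cons]
    rcases List.mem_cons.mp hk with rfl | hk'
    · have hnil : xs.flatMap f = [] := List.flatMap_eq_nil_iff.mpr
        (fun j hj => hz j (List.mem_cons_of_mem _ hj)
          (fun h => (List.nodup_cons.mp hnd).1 (h ▸ hj)))
      rw [hnil, List.append_nil]
    · rw [hz x List.mem_cons_self (fun h => (List.nodup_cons.mp hnd).1 (h ▸ hk')),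
        ih (List.nodup_cons.mp hnd).2 hk'
          (fun j hj hne => hz j (List.mem_cons_of_mem _ hj) hne), List.nil_append]

theorem flatMap_ite_singleton (l : List Nat) (p : Nat → Bool) (g : Nat → Int) :
    l.flatMap (fun j => if p j then [g j] else []) = (l.filter p).map g := by
  induction l with
  | nil => rfl
  | cons x xs ih =>
    by_cases hp : p x <;> simp [hp, ih]

theorem contrib_eq_nil (arr : List String) (k : Nat) {i j : Nat} (hi : i ≠ k) (hj : j ≠ k) :
    contrib arr k (i, j) = [] := by
  unfold contrib; simp [hi, hj]

theorem flatMap_contrib (arr : List String) (n k : Nat) (hk : k < n) :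
    (pairsList n).flatMap (contrib arr k)
      = ((List.range n).filter (fun j => Pnat arr k j)).map (fun j : Nat => (j : Int)) := by
  have hirr : ∀ m : Nat, Pnat arr m m = false := fun m => check_str_irrefl _
  have hsymm : ∀ i j : Nat, Pnat arr i j = Pnat arr j i := fun i j => check_str_symm _ _
  -- the double loop flattened to j-ranges
  have step1 : (pairsList n).flatMap (contrib arr k)
      = (List.range n).flatMap (fun i => (List.range' i (n - i)).flatMap
          (fun j => contrib arr k (i, j))) := by
    unfold pairsList
    rw [List.flatMap_assoc]
    refine List.flatMap_congr ?_
    intro i _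
    rw [List.flatMap_map, List.range'_eq_map_range, List.flatMap_map]
  -- the inner loop, by position of i relative to k
  have hlt : ∀ i, i < k → (List.range' i (n - i)).flatMap (fun j => contrib arr k (i, j))
      = (if Pnat arr i k then [(i : Int)] else []) := by
    intro i hik
    have hne : i ≠ k := Nat.ne_of_lt hik
    rw [flatMap_single _ _ k List.nodup_range'
      (List.mem_range'_1.mpr ⟨Nat.le_of_lt hik, by omega⟩)
      (fun j _ hj => contrib_eq_nil arr k hne hj)]
    unfold contrib
    simp [hne]
  have heq : (List.range' k (n - k)).flatMap (fun j => contrib arr k (k, j))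
      = ((List.range' k (n - k)).filter (fun j => Pnat arr k j)).map (fun j : Nat => (j : Int)) := by
    rw [← flatMap_ite_singleton]
    refine List.flatMap_congr ?_
    intro j _
    by_cases hj : j = k
    · subst hj; unfold contrib; simp [hirr]
    · unfold contrib; simp [hj]
  have hgt : ∀ i, k < i → (List.range' i (n - i)).flatMap (fun j => contrib arr k (i, j))
      = [] := by
    intro i hik
    refine List.flatMap_eq_nil_iff.mpr ?_
    intro j hj
    have hji : i ≤ j := (List.mem_range'_1.mp hj).1
    exact contrib_eq_nil arr k (by omega) (by omega)
  -- split the outer range at k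
  have hsplit : List.range n = List.range k ++ List.range' k (n - k) := by
    rw [List.range_eq_range', show n = k + (n - k) by omega,
      ← List.range'_append (s := 0) (m := k) (n := n - k) (step := 1)]
    simp [List.range_eq_range']
  rw [step1, hsplit, List.flatMap_append]
  have hfirst : (List.range k).flatMap (fun i => (List.range' i (n - i)).flatMap
      (fun j => contrib arr k (i, j)))
      = ((List.range k).filter (fun j => Pnat arr k j)).map (fun j : Nat => (j : Int)) := by
    rw [← flatMap_ite_singleton]
    refine List.flatMap_congr ?_
    intro i hi
    rw [hlt i (List.mem_range.mp hi), hsymm i k]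
  have hsecond : (List.range' k (n - k)).flatMap (fun i => (List.range' i (n - i)).flatMap
      (fun j => contrib arr k (i, j)))
      = ((List.range' k (n - k)).filter (fun j => Pnat arr k j)).map (fun j : Nat => (j : Int)) := by
    have hcons : List.range' k (n - k) = k :: List.range' (k + 1) (n - k - 1) := by
      conv_lhs => rw [show n - k = (n - k - 1) + 1 by omega]
      rw [List.range'_succ]
    have htail : (List.range' (k + 1) (n - k - 1)).flatMap (fun i => (List.range' i (n - i)).flatMap
        (fun j => contrib arr k (i, j))) = [] := by
      refine List.flatMap_eq_nil_iff.mpr ?_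
      intro i hi
      exact hgt i (by have := (List.mem_range'_1.mp hi).1; omega)
    conv_lhs => rw [hcons]
    simp only [List.flatMap_cons]
    rw [htail, List.append_nil, heq]
  rw [hfirst, hsecond, ← List.map_append, ← List.filter_append]

theorem foldl_flatMap' {α β γ : Type} (l : List α) (f : α → List β) (g : γ → β → γ) (init : γ) :
    (l.flatMap f).foldl g init = l.foldl (fun acc x => (f x).foldl g acc) init := by
  induction l generalizing init with
  | nil => rfl
  | cons x xs ih => simp [List.foldl_append, ih]

theorem prepare_map_eq_fold (arr : List String) :
    prepare_map arr = (pairsList arr.length).foldl (stepP arr) (arr.map (fun _ => [])) := by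
  unfold prepare_map pairsList
  rw [foldl_flatMap', PySem.List.pyRange_zero_natCast, List.foldl_map]
  have houter : (fun (mb : List (List Int)) (i : Nat) =>
      (PySem.List.pyRange (i : Int) (arr.length : Int) 1).foldl (fun mb j =>
        if check_str (PySem.List.pyGetD arr (i : Int) "") (PySem.List.pyGetD arr j "") then
          let mb1 := PySem.List.pySetD mb (i : Int) (PySem.List.pyGetD mb (i : Int) [] ++ [j])
          PySem.List.pySetD mb1 j (PySem.List.pyGetD mb1 j [] ++ [(i : Int)])
        else mb) mb)
      = (fun mb i => (List.range (arr.length - i)).foldl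
          (fun mb d => stepP arr mb (i, i + d)) mb) := by
    funext mb i
    rw [PySem.List.pyRange_one,
      show (((arr.length : Int)) - (i : Int)).toNat = arr.length - i by omega, List.foldl_map]
    have hbody : (fun (mb : List (List Int)) (d : Nat) =>
        if check_str (PySem.List.pyGetD arr (i : Int) "")
            (PySem.List.pyGetD arr ((i : Int) + (d : Int)) "") then
          let mb1 := PySem.List.pySetD mb (i : Int)
            (PySem.List.pyGetD mb (i : Int) [] ++ [(i : Int) + (d : Int)])
          PySem.List.pySetD mb1 ((i : Int) + (d : Int))
            (PySem.List.pyGetD mb1 ((i : Int) + (d : Int)) [] ++ [(i : Int)])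
        else mb)
        = (fun mb d => stepP arr mb (i, i + d)) := by
      funext mb d
      unfold stepP Pnat
      rw [show (i : Int) + (d : Int) = ((i + d : Nat) : Int) by push_cast; ring]
      simp only [PySem.List.pyGetD_natCast, PySem.List.pySetD_natCast]
    rw [hbody]
  rw [houter]
  simp only [List.foldl_map]

theorem getD_sig (arr : List String) (m : Nat) :
    (arr.map (fun w => PySem.List.sorted w.toList (fun c => c) false)).getD m []
      = PySem.List.sorted (arr.getD m "").toList (fun c => c) false := by
  rw [List.getD_eq_getElem?_getD, List.getElem?_map, List.getD_eq_getElem?_getD]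
  cases h : arr[m]?
  · simp; rfl
  · simp

theorem prepare_map_alt_eq (arr : List String) :
    prepare_map_alt arr = (List.range arr.length).map (fun k =>
      ((List.range arr.length).filter (fun j => Pnat arr k j)).map (fun j : Nat => (j : Int))) := by
  unfold prepare_map_alt
  simp only [PySem.List.pyRange_zero_natCast, List.map_map, List.filter_map, Function.comp_def,
    PySem.List.pyGetD_natCast, getD_sig, near_sorted_eq, Pnat]

-- ===== VERDICT (by name: the statement is the Claim_ definition above) =====
theorem pairsList_bound (n : Nat) : ∀ p ∈ pairsList n, p.1 < n ∧ p.2 < n := by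
  intro p hp
  unfold pairsList at hp
  obtain ⟨i, hi, hp⟩ := List.mem_flatMap.mp hp
  obtain ⟨d, hd, rfl⟩ := List.mem_map.mp hp
  have h1 := List.mem_range.mp hi
  have h2 := List.mem_range.mp hd
  exact ⟨h1, by omega⟩

theorem prepare_map_spec : Claim_equal_prepare_map := by
  intro arr _
  unfold Spec_prepare_map
  rw [prepare_map_eq_fold, prepare_map_alt_eq]
  have hlen : ((pairsList arr.length).foldl (stepP arr) (arr.map (fun _ => []))).length
      = arr.length := by
    rw [length_foldl_stepP]; simp
  apply List.ext_getElem
  · rw [hlen, List.length_map, List.length_range]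
  · intro k hk1 hk2
    have hkn : k < arr.length := hlen ▸ hk1
    have hbound : ∀ p ∈ pairsList arr.length,
        p.1 < (arr.map (fun _ => ([] : List Int))).length ∧
        p.2 < (arr.map (fun _ => ([] : List Int))).length := by
      simpa using pairsList_bound arr.length
    have hget := foldl_stepP_getD arr (pairsList arr.length) (arr.map (fun _ => [])) k hbound
    rw [flatMap_contrib arr arr.length k hkn] at hget
    have hinit : (arr.map (fun _ => ([] : List Int))).getD k [] = [] := by
      rw [List.getD_eq_getElem?_getD]
      cases h : (arr.map (fun _ => ([] : List Int)))[k]? <;> simp_all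
    rw [hinit, List.nil_append] at hget
    have hgetD : ((pairsList arr.length).foldl (stepP arr) (arr.map (fun _ => [])))[k]
        = ((pairsList arr.length).foldl (stepP arr) (arr.map (fun _ => []))).getD k [] := by
      rw [List.getD_eq_getElem?_getD, List.getElem?_eq_getElem hk1, Option.getD_some]
    rw [hgetD, hget]
    rw [List.getElem_map, List.getElem_range]
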